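-- pv_equiv track=rewrite | github.com/bladeacer/obsi-snip-coll | extract-snippets.py | build_filtered_lines_map
-- ===== SOURCE A (Python) =====
-- def build_filtered_lines_map(content):
--     """
--     Creates a mapping from original line numbers to "code-only" line numbers,
--     ignoring comments and blank lines.
--     """
--     filtered_lines_map = {}
--     filtered_line_counter = 0
--     in_comment_block = False
--
--     lines = content.split('\n')
--     for i, line in enumerate(lines, 1):
--         stripped_line = line.strip()
--
--         # Check for start of multiline comment
--         if '/*' in stripped_line and '*/' not in stripped_line:
--             in_comment_block = True
--
--         # Check for end of multiline comment
--         if '*/' in stripped_line and '/*' not in stripped_line: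
--             in_comment_block = False
--
--         is_code_line = False
--         if not in_comment_block and stripped_line:
--             # Check for a single-line comment block
--             if not stripped_line.startswith('/*') or not stripped_line.endswith('*/'):
--                 is_code_line = True
--
--         if is_code_line:
--             filtered_line_counter += 1
--
--         filtered_lines_map[i] = filtered_line_counter
--
--     return filtered_lines_map
-- ===== SOURCE B (Python) =====
-- def build_filtered_lines_map(content):
--     # Stage 1: per-line 0/1 code flags via the comment-block state machine.
--     flags = []
--     in_comment_block = False
--     for line in content.split('\n'):
--         s = line.strip()
--         if '/*' in s and '*/' not in s:
--             in_comment_block = True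
--         if '*/' in s and '/*' not in s:
--             in_comment_block = False
--         flags.append(1 if (not in_comment_block and s
--                            and not (s.startswith('/*') and s.endswith('*/'))) else 0)
--     # Stage 2: running totals = prefix sums of the flags.
--     totals = []
--     t = 0
--     for f in flags:
--         t += f
--         totals.append(t)
--     # Stage 3: pair line numbers (from 1) with their running totals.
--     return {i: t for i, t in enumerate(totals, 1)}
-- ===== Notes on version B (the rewrite author's own statement) =====
-- stated objective: alternative
-- what changed: A's single loop mutating a dict while updating a running counter is replaced by a three-stage pipeline: a pass emitting a 0/1 code-line flag per line, a separate prefix-sum pass over the flags, and a dict built at the end from enumerate of the totals.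
import Mathlib
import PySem

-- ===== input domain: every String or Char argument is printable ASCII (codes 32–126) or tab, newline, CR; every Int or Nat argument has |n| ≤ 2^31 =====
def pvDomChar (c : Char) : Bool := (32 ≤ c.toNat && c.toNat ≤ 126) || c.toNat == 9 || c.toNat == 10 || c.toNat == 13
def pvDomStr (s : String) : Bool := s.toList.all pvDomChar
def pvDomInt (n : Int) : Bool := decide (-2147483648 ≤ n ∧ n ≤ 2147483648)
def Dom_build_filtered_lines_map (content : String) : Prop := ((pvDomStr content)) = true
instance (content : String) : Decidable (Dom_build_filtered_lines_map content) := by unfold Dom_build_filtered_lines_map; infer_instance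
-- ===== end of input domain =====

-- B replaces A's single dict-and-counter loop by a pipeline: per-line 0/1 flags,
-- then prefix sums, then a dict built from enumerate (alternative decomposition, same cost).

-- ===== PORT A =====
def build_filtered_lines_map (content : String) : List (Int × Int) :=
  let lines := (PySem.Str.split? content "\n").getD []   -- sep "\n" ≠ "", so split? is always some
  ((PySem.List.enumerate lines 1).foldl
    (fun (st : PySem.Dict Int Int × Int × Bool) p =>
      let stripped := PySem.Str.strip p.2
      let inB1 := if PySem.Str.isIn "/*" stripped && !PySem.Str.isIn "*/" stripped then true else st.2.2
      let inB2 := if PySem.Str.isIn "*/" stripped && !PySem.Str.isIn "/*" stripped then false else inB1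
      let isCode :=
        if !inB2 && stripped != "" then
          (if !(PySem.Str.startswith stripped "/*") || !(PySem.Str.endswith stripped "*/") then true else false)
        else false
      let counter := if isCode then st.2.1 + 1 else st.2.1
      (st.1.insert p.1 counter, counter, inB2))
    (PySem.Dict.empty, 0, false)).1.items

-- ===== PORT B =====
-- Stage 1 of Source B: the comment-block state machine emitting a 0/1 flag per line
def pvCodeFlags : List String → Bool → List Int
  | [], _ => []
  | line :: rest, inB =>
    let s := PySem.Str.strip line
    let inB1 := if PySem.Str.isIn "/*" s && !PySem.Str.isIn "*/" s then true else inB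
    let inB2 := if PySem.Str.isIn "*/" s && !PySem.Str.isIn "/*" s then false else inB1
    (if !inB2 && s != "" && !(PySem.Str.startswith s "/*" && PySem.Str.endswith s "*/")
      then (1 : Int) else 0) :: pvCodeFlags rest inB2

-- Stage 2 of Source B: prefix sums of the flags
def pvPrefixSums : List Int → Int → List Int
  | [], _ => []
  | f :: rest, t => (t + f) :: pvPrefixSums rest (t + f)

def build_filtered_lines_map_alt (content : String) : List (Int × Int) :=
  let flags := pvCodeFlags ((PySem.Str.split? content "\n").getD []) false
  let totals := pvPrefixSums flags 0
  ((PySem.List.enumerate totals 1).foldl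
    (fun (d : PySem.Dict Int Int) p => d.insert p.1 p.2) PySem.Dict.empty).items

-- ===== PRECONDITION & SPEC =====
def Spec_build_filtered_lines_map (content : String) (out : List (Int × Int)) : Prop := out = build_filtered_lines_map_alt content
instance (content : String) (out : List (Int × Int)) : Decidable (Spec_build_filtered_lines_map content out) := by unfold Spec_build_filtered_lines_map; infer_instance

-- ===== CLAIM (what is proved, stated in full; the proofs are below) =====
def Claim_equal_build_filtered_lines_map : Prop := ∀ (content : String), Dom_build_filtered_lines_map content → Spec_build_filtered_lines_map content (build_filtered_lines_map content)

-- ===== LEMMAS AND PROOFS =====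

-- proof-only helpers: the comment-block toggle and the 0/1 flag as named functions
def pvNewB (line : String) (inB : Bool) : Bool :=
  let s := PySem.Str.strip line
  let inB1 := if PySem.Str.isIn "/*" s && !PySem.Str.isIn "*/" s then true else inB
  if PySem.Str.isIn "*/" s && !PySem.Str.isIn "/*" s then false else inB1

def pvFlag (line : String) (inB : Bool) : Int :=
  let s := PySem.Str.strip line
  if !(pvNewB line inB) && s != "" && !(PySem.Str.startswith s "/*" && PySem.Str.endswith s "*/")
    then 1 else 0

theorem pvCodeFlags_cons (line : String) (rest : List String) (inB : Bool) :
    pvCodeFlags (line :: rest) inB = pvFlag line inB :: pvCodeFlags rest (pvNewB line inB) := rfl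

-- A's loop body as a named function (definitionally the lambda in the port)
def pvStepA (st : PySem.Dict Int Int × Int × Bool) (p : Int × String) :
    PySem.Dict Int Int × Int × Bool :=
  let stripped := PySem.Str.strip p.2
  let inB1 := if PySem.Str.isIn "/*" stripped && !PySem.Str.isIn "*/" stripped then true else st.2.2
  let inB2 := if PySem.Str.isIn "*/" stripped && !PySem.Str.isIn "/*" stripped then false else inB1
  let isCode :=
    if !inB2 && stripped != "" then
      (if !(PySem.Str.startswith stripped "/*") || !(PySem.Str.endswith stripped "*/") then true else false)
    else false
  let counter := if isCode then st.2.1 + 1 else st.2.1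
  (st.1.insert p.1 counter, counter, inB2)

theorem pvStepA_apply (d : PySem.Dict Int Int) (c : Int) (inB : Bool) (i : Int) (line : String) :
    pvStepA (d, c, inB) (i, line)
      = (d.insert i (c + pvFlag line inB), c + pvFlag line inB, pvNewB line inB) := by
  unfold pvStepA pvFlag pvNewB
  simp only
  cases hb : (if PySem.Str.isIn "*/" (PySem.Str.strip line) && !PySem.Str.isIn "/*" (PySem.Str.strip line)
      then false
      else if PySem.Str.isIn "/*" (PySem.Str.strip line) && !PySem.Str.isIn "*/" (PySem.Str.strip line)
        then true else inB) <;>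
    cases h2 : (PySem.Str.strip line != "") <;>
    cases h3 : PySem.Str.startswith (PySem.Str.strip line) "/*" <;>
    cases h4 : PySem.Str.endswith (PySem.Str.strip line) "*/" <;>
    simp_all

-- Folding insert over enumerate with fresh increasing keys just appends the pairs.
theorem pv_items_foldl_insert (xs : List Int) (i : Int) (d : PySem.Dict Int Int)
    (hk : ∀ k ∈ d.keys, k < i) :
    ((PySem.List.enumerate xs i).foldl (fun d p => d.insert p.1 p.2) d).items
      = d.items ++ PySem.List.enumerate xs i := by
  induction xs generalizing d i with
  | nil => simp [PySem.List.enumerate_nil]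
  | cons x xs ih =>
    rw [PySem.List.enumerate_cons, List.foldl_cons]
    have hc : d.contains i = false := by
      rw [PySem.Dict.contains_eq_decide_mem_keys]
      simp only [decide_eq_false_iff_not]
      intro h; exact absurd (hk i h) (lt_irrefl i)
    rw [ih (i + 1) (d.insert i x) ?_]
    · rw [PySem.Dict.items_insert_of_not_contains _ _ hc]
      simp
    · intro k hkm
      rw [PySem.Dict.keys_insert_of_not_contains _ _ hc] at hkm
      rcases List.mem_append.mp hkm with h | h
      · exact lt_trans (hk k h) (by omega)
      · simp at h; omega

-- A's fold equals the accumulated flags, for any starting state.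
theorem pv_A_fold (lines : List String) (inB : Bool) (c : Int) (d : PySem.Dict Int Int) (i : Int)
    (hk : ∀ k ∈ d.keys, k < i) :
    ((PySem.List.enumerate lines i).foldl pvStepA (d, c, inB)).1.items
      = d.items ++ PySem.List.enumerate (pvPrefixSums (pvCodeFlags lines inB) c) i := by
  induction lines generalizing inB c d i with
  | nil => simp [PySem.List.enumerate_nil, pvCodeFlags, pvPrefixSums]
  | cons line rest ih =>
    rw [PySem.List.enumerate_cons, List.foldl_cons]
    have hc : d.contains i = false := by
      rw [PySem.Dict.contains_eq_decide_mem_keys]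
      simp only [decide_eq_false_iff_not]
      intro h; exact absurd (hk i h) (lt_irrefl i)
    have hins : ∀ k ∈ (d.insert i (c + pvFlag line inB)).keys, k < i + 1 := by
      intro k hkm
      rw [PySem.Dict.keys_insert_of_not_contains _ _ hc] at hkm
      rcases List.mem_append.mp hkm with h | h
      · exact lt_trans (hk k h) (by omega)
      · simp at h; omega
    rw [pvStepA_apply, ih _ _ _ _ hins, PySem.Dict.items_insert_of_not_contains _ _ hc,
        pvCodeFlags_cons]
    simp [pvPrefixSums, PySem.List.enumerate_cons]

-- ===== VERDICT (by name: the statement is the Claim_ definition above) =====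
theorem build_filtered_lines_map_spec : Claim_equal_build_filtered_lines_map := by
  intro content _
  unfold Spec_build_filtered_lines_map
  have hA : build_filtered_lines_map content
      = ((PySem.List.enumerate ((PySem.Str.split? content "\n").getD []) 1).foldl pvStepA
          (PySem.Dict.empty, 0, false)).1.items := rfl
  have hB : build_filtered_lines_map_alt content
      = ((PySem.List.enumerate
            (pvPrefixSums (pvCodeFlags ((PySem.Str.split? content "\n").getD []) false) 0) 1).foldl
          (fun d p => d.insert p.1 p.2) PySem.Dict.empty).items := rfl
  rw [hA, hB, pv_A_fold _ _ _ _ _ (by simp [PySem.Dict.keys_empty]),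
      pv_items_foldl_insert _ _ _ (by simp [PySem.Dict.keys_empty])]
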